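-- pv_equiv track=rewrite | github.com/Misha1302/VisshaaProbaZadania | DorogoiSklad/judje.py | count_nonzero_blocks
-- ===== SOURCE A (Python) =====
-- def count_nonzero_blocks(arr: list[int]) -> int:
--     blocks = 0
--     inside = False
--
--     for value in arr:
--         if value != 0:
--             if not inside:
--                 blocks += 1
--                 inside = True
--         else:
--             inside = False
--
--     return blocks
-- ===== SOURCE B (Python) =====
-- def count_nonzero_blocks(arr: list[int]) -> int:
--     # Encode the list as a string ('x' for nonzero, space for zero); maximal
--     # nonzero runs become the whitespace-separated words, so str.split() counts them.
--     return len(''.join('x' if v else ' ' for v in arr).split())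
-- ===== Notes on version B (the rewrite author's own statement) =====
-- stated objective: idiomatic
-- what changed: Replaced the explicit 'inside' boolean state machine with staged passes: encode the list as a string of 'x'/' ' marks, whitespace-split it, and take the number of words.
import Mathlib
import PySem

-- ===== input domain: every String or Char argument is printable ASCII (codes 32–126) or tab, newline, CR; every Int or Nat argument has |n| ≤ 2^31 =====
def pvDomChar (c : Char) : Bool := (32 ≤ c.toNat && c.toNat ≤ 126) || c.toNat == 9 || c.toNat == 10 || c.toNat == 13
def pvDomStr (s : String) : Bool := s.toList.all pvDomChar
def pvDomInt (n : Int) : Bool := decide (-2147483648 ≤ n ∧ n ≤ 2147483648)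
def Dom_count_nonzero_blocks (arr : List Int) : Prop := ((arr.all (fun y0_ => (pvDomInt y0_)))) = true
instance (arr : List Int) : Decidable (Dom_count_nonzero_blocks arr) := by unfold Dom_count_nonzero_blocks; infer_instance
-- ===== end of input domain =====

-- B replaces A's explicit 'inside' state machine by staged passes: encode the list
-- as a string of 'x'/' ' marks, whitespace-split it, and count the words (idiomatic).


-- ===== PORT A =====
-- literal port of A's loop: state (blocks, inside)
def pvStepA (s : Int × Bool) (value : Int) : Int × Bool :=
  if value ≠ 0 then
    if !s.2 then (s.1 + 1, true) else s
  else
    (s.1, false)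

def count_nonzero_blocks (arr : List Int) : Int :=
  (arr.foldl pvStepA (0, false)).1

-- ===== PORT B =====
def count_nonzero_blocks_alt (arr : List Int) : Int :=
  ((PySem.Str.split₀ (String.ofList (arr.map (fun v => if v ≠ 0 then 'x' else ' ')))).length : Nat)

-- ===== PRECONDITION & SPEC =====
def Spec_count_nonzero_blocks (arr : List Int) (out : Int) : Prop := out = count_nonzero_blocks_alt arr
instance (arr : List Int) (out : Int) : Decidable (Spec_count_nonzero_blocks arr out) := by unfold Spec_count_nonzero_blocks; infer_instance

-- ===== CLAIM (what is proved, stated in full; the proofs are below) =====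
def Claim_equal_count_nonzero_blocks : Prop := ∀ (arr : List Int), Dom_count_nonzero_blocks arr → Spec_count_nonzero_blocks arr (count_nonzero_blocks arr)

-- ===== LEMMAS AND PROOFS =====

-- abstract block counter over the nonzero-key list, threading the 'inside' flag
def pvGo : List Bool → Bool → Int
  | [], _ => 0
  | k :: t, i => (if k && !i then 1 else 0) + pvGo t k

lemma foldA_eq_go (arr : List Int) (b : Int) (i : Bool) :
    (arr.foldl pvStepA (b, i)).1 = b + pvGo (arr.map (fun x => decide (x ≠ 0))) i := by
  induction arr generalizing b i with
  | nil => simp [pvGo]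
  | cons v t ih =>
    rw [List.foldl_cons]
    by_cases hv : v = 0
    · have h : pvStepA (b, i) v = (b, false) := by simp [pvStepA, hv]
      rw [h, ih]; simp [pvGo, hv]
    · cases i with
      | false =>
        have h : pvStepA (b, false) v = (b + 1, true) := by simp [pvStepA, hv]
        rw [h, ih]; simp [pvGo, hv]; ring
      | true =>
        have h : pvStepA (b, true) v = (b, true) := by simp [pvStepA, hv]
        rw [h, ih]; simp [pvGo, hv]

-- the mark character for one key
def pvChr (k : Bool) : Char := if k then 'x' else ' '

lemma split_go_count (ks : List Bool) (cur : List Char) (acc : List (List Char)) :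
    ((PySem.Chars.split₀.go (ks.map pvChr) cur acc).length : Int) =
      acc.length + (if cur.isEmpty then 0 else 1) + pvGo ks (!cur.isEmpty) := by
  induction ks generalizing cur acc with
  | nil =>
    by_cases h : cur.isEmpty <;> simp [PySem.Chars.split₀.go, h, pvGo]

  | cons k t ih =>
    cases k with
    | true =>
      have hx : PySem.Chars.isspace 'x' = false := by decide
      rw [List.map_cons]
      show ((PySem.Chars.split₀.go ('x' :: t.map pvChr) cur acc).length : Int) = _
      rw [show PySem.Chars.split₀.go ('x' :: t.map pvChr) cur acc
            = PySem.Chars.split₀.go (t.map pvChr) ('x' :: cur) acc by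
        simp [PySem.Chars.split₀.go, hx]]
      rw [ih]
      by_cases h : cur.isEmpty
      · simp [h, pvGo]; ring
      · simp [h, pvGo]
    | false =>
      have hs : PySem.Chars.isspace ' ' = true := by decide
      rw [List.map_cons]
      show ((PySem.Chars.split₀.go (' ' :: t.map pvChr) cur acc).length : Int) = _
      by_cases h : cur.isEmpty
      · rw [show PySem.Chars.split₀.go (' ' :: t.map pvChr) cur acc
              = PySem.Chars.split₀.go (t.map pvChr) [] acc by
          simp [PySem.Chars.split₀.go, hs, h]]
        rw [ih]; simp [h, pvGo]
      · rw [show PySem.Chars.split₀.go (' ' :: t.map pvChr) cur acc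
              = PySem.Chars.split₀.go (t.map pvChr) [] (cur.reverse :: acc) by
          simp [PySem.Chars.split₀.go, hs, h]]
        rw [ih]; simp [h, pvGo]

-- ===== VERDICT (by name: the statement is the Claim_ definition above) =====
theorem count_nonzero_blocks_spec : Claim_equal_count_nonzero_blocks := by
  intro arr _
  unfold Spec_count_nonzero_blocks count_nonzero_blocks count_nonzero_blocks_alt
  rw [foldA_eq_go]
  have hmap : arr.map (fun v => if v ≠ 0 then 'x' else ' ')
      = (arr.map (fun x => decide (x ≠ 0))).map pvChr := by
    simp [List.map_map, pvChr, Function.comp]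
  have hlen : (PySem.Str.split₀ (String.ofList (arr.map (fun v => if v ≠ 0 then 'x' else ' ')))).length
      = (PySem.Chars.split₀ ((arr.map (fun x => decide (x ≠ 0))).map pvChr)).length := by
    rw [PySem.Str.split₀]
    simp only [List.length_map]
    congr 1
    rw [String.toList_ofList, hmap, List.map_map]
  rw [hlen, PySem.Chars.split₀]
  have := split_go_count (arr.map (fun x => decide (x ≠ 0))) [] []
  simp at this ⊢
  omega
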